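-- pv_equiv track=rewrite | github.com/Riyaz18/abacus-ai-tutor | ai_logic.py | generate_multiplication_steps
-- ===== SOURCE A (Python) =====
-- def generate_multiplication_steps(n1: int, n2: int):
--     steps = []
--     total = 0
--     for i in range(n2):
--         prev = total
--         total += n1
--         steps.append(f"Add {n1} again: {prev} + {n1} = {total}")
--     return steps
-- ===== SOURCE B (Python) =====
-- def generate_multiplication_steps(n1: int, n2: int):
--     # closed form: drop the running accumulator; each step's operands come from multiplication
--     return [f"Add {n1} again: {n1 * i} + {n1} = {n1 * (i + 1)}" for i in range(n2)]
-- ===== Notes on version B (the rewrite author's own statement) =====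
-- stated objective: alternative
-- what changed: Replaces the running-total accumulator threaded through the loop with a stateless comprehension computing each step's operands in closed form (n1*i and n1*(i+1)).
import Mathlib
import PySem

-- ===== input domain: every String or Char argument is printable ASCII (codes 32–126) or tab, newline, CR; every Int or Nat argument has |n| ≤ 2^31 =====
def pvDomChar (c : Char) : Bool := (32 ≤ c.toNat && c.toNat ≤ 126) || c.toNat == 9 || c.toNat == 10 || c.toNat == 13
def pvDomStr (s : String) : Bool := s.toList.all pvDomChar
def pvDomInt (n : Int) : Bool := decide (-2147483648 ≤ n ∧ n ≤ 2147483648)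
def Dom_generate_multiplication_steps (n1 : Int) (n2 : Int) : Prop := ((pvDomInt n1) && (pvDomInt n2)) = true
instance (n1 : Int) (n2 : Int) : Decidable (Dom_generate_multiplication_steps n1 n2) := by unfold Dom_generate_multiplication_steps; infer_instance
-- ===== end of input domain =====

-- B drops A's running total and computes each step's operands in closed form from the index.

-- ===== PORT A =====
-- the f-string "Add {n1} again: {prev} + {n1} = {total}"
def pvStepMsg (n1 prev total : Int) : String :=
  "Add " ++ PySem.Int.toStr n1 ++ " again: " ++ PySem.Int.toStr prev ++ " + " ++
    PySem.Int.toStr n1 ++ " = " ++ PySem.Int.toStr total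

def generate_multiplication_steps (n1 : Int) (n2 : Int) : List String :=
  -- steps = []; total = 0; for i in range(n2): prev = total; total += n1; steps.append(...)
  -- steps.append(x) is ported as cons onto a reversed accumulator, reversed at the end
  -- (Python's O(1) append; same elements in the same order)
  let st := (PySem.List.pyRange 0 n2 1).foldl
    (fun (st : List String × Int) _i =>
      let prev := st.2
      let total := st.2 + n1
      (pvStepMsg n1 prev total :: st.1, total))
    ([], 0)
  st.1.reverse

-- ===== PORT B =====
def generate_multiplication_steps_alt (n1 : Int) (n2 : Int) : List String :=
  (PySem.List.pyRange 0 n2 1).map (fun i => pvStepMsg n1 (n1 * i) (n1 * (i + 1)))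

-- ===== PRECONDITION & SPEC =====
def Spec_generate_multiplication_steps (n1 : Int) (n2 : Int) (out : List String) : Prop := out = generate_multiplication_steps_alt n1 n2
instance (n1 : Int) (n2 : Int) (out : List String) : Decidable (Spec_generate_multiplication_steps n1 n2 out) := by unfold Spec_generate_multiplication_steps; infer_instance

-- ===== CLAIM (what is proved, stated in full; the proofs are below) =====
def Claim_equal_generate_multiplication_steps : Prop := ∀ (n1 : Int) (n2 : Int), Dom_generate_multiplication_steps n1 n2 → Spec_generate_multiplication_steps n1 n2 (generate_multiplication_steps n1 n2)

-- ===== LEMMAS AND PROOFS =====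
-- loop invariant: after m iterations the state is (the first m messages, n1 * m)
theorem pv_loop_inv (n1 : Int) (m : Nat) :
    (PySem.List.pyRange 0 m 1).foldl
      (fun (st : List String × Int) _i =>
        (pvStepMsg n1 st.2 (st.2 + n1) :: st.1, st.2 + n1))
      ([], 0)
    = (((PySem.List.pyRange 0 m 1).map (fun i => pvStepMsg n1 (n1 * i) (n1 * (i + 1)))).reverse, n1 * m) := by
  induction m with
  | zero => simp
  | succ k ih =>
    have h : PySem.List.pyRange 0 ((k : Int) + 1) 1 = PySem.List.pyRange 0 k 1 ++ [(k : Int)] :=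
      PySem.List.pyRange_one_succ_right (by exact_mod_cast Nat.zero_le k)
    push_cast
    rw [h, List.foldl_append, List.map_append, ih]
    simp
    constructor
    · ring_nf
    · ring

theorem pv_equal (n1 n2 : Int) :
    generate_multiplication_steps n1 n2 = generate_multiplication_steps_alt n1 n2 := by
  unfold generate_multiplication_steps generate_multiplication_steps_alt
  by_cases h : n2 ≤ 0
  · rw [PySem.List.pyRange_one_eq_nil h]; rfl
  · rw [not_le] at h
    obtain ⟨m, rfl⟩ : ∃ m : Nat, n2 = (m : Int) := ⟨n2.toNat, (Int.toNat_of_nonneg h.le).symm⟩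
    show (List.foldl (fun (st : List String × Int) _i =>
        (pvStepMsg n1 st.2 (st.2 + n1) :: st.1, st.2 + n1)) ([], 0)
        (PySem.List.pyRange 0 (m : Int))).1.reverse = _
    rw [congrArg Prod.fst (pv_loop_inv n1 m), List.reverse_reverse]

-- ===== VERDICT (by name: the statement is the Claim_ definition above) =====
theorem generate_multiplication_steps_spec : Claim_equal_generate_multiplication_steps := by
  intro n1 n2 _
  exact pv_equal n1 n2
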